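-- pv_equiv track=rewrite | github.com/akhtarmdsaad/leetcode | ab_string.py | solve
-- ===== SOURCE A (Python) =====
-- def solve(string):
--     n = len(string)
--     i=0
--     j=n-1
--     count = 0
--     while i<j:
--         if string[i] == "B":
--             count += 1
--         if string[j] == "A":
--             count += 1
--         i+=1
--         j-=1
--     return count
-- ===== SOURCE B (Python) =====
-- def solve(string):
--     n = len(string)
--     half = n // 2
--     total = 0
--     for i, c in enumerate(string):
--         if i < half:
--             if c == "B":
--                 total += 1
--         elif i >= n - half:
--             if c == "A":
--                 total += 1
--     return total
-- ===== Notes on version B (the rewrite author's own statement) =====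
-- stated objective: alternative
-- what changed: Replaces A's bidirectional two-pointer loop (walking i forward and j backward simultaneously, testing the end characters against each other per iteration) with a single forward enumerate pass that classifies each position by region (front half looks for B, back half for A, middle skipped) and accumulates one counter.
import Mathlib
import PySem

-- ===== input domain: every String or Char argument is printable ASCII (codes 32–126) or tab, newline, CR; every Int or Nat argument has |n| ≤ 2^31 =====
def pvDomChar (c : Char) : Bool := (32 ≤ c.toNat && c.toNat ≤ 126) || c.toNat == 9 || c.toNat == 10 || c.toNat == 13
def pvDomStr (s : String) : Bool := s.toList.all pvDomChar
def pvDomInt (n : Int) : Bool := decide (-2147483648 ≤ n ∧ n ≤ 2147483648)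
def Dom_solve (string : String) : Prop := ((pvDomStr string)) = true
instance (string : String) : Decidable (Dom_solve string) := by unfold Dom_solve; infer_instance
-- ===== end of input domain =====

-- B replaces A's bidirectional two-pointer loop with a single forward enumerate pass that
-- classifies each position by region (front half: count 'B'; back half: count 'A'); alternative, not faster.

-- ===== PORT A =====
-- the while-loop of A: i walks forward, j backward, counting matches at each end
def solveLoop (s : String) (i j count : Int) : Int :=
  if i < j then
    let count := if PySem.Str.pyGet? s i = some 'B' then count + 1 else count
    let count := if PySem.Str.pyGet? s j = some 'A' then count + 1 else count
    solveLoop s (i + 1) (j - 1) count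
  else count
termination_by (j - i).toNat
decreasing_by omega

def solve (string : String) : Int :=
  let n := PySem.Str.len string
  solveLoop string 0 (n - 1) 0

-- ===== PORT B =====
-- Source B: one forward pass over enumerate(string), classifying each index into
-- front half (look for 'B'), back half (look for 'A'), or middle (skip).
def solve_alt (string : String) : Int :=
  let n := PySem.Str.len string
  let half := PySem.Int.floordiv n 2
  (PySem.List.enumerate string.toList).foldl
    (fun total p =>
      if p.1 < half then (if p.2 = 'B' then total + 1 else total)
      else if n - half ≤ p.1 then (if p.2 = 'A' then total + 1 else total)
      else total) 0

-- ===== PRECONDITION & SPEC =====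
def Spec_solve (string : String) (out : Int) : Prop := out = solve_alt string
instance (string : String) (out : Int) : Decidable (Spec_solve string out) := by unfold Spec_solve; infer_instance

-- ===== CLAIM =====
def Claim_equal_solve : Prop := ∀ (string : String), Dom_solve string → Spec_solve string (solve string)

-- ===== LEMMAS AND PROOFS =====

-- B's fold over enumerate, started at index k, counts 'B' on the first (h-k) elements and
-- 'A' on the elements from position (m-k) on (h = front-half bound, m = back-half bound, h ≤ m)
theorem enumFold (h m : Nat) (hm : h ≤ m) :
    ∀ (l : List Char) (k : Nat) (c : Int),
      (PySem.List.enumerate l (k : Int)).foldl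
        (fun total p =>
          if p.1 < (h : Int) then (if p.2 = 'B' then total + 1 else total)
          else if (m : Int) ≤ p.1 then (if p.2 = 'A' then total + 1 else total)
          else total) c
      = c + ((l.take (h - k)).count 'B' : Int) + ((l.drop (m - k)).count 'A' : Int) := by
  intro l
  induction l with
  | nil => intro k c; simp [PySem.List.enumerate_nil]
  | cons x t ih =>
    intro k c
    rw [PySem.List.enumerate_cons, List.foldl_cons]
    have hk1cast : (k : Int) + 1 = ((k + 1 : Nat) : Int) := by push_cast; ring
    by_cases hk1 : k < h
    · rw [if_pos (show (((k:Int),x)).1 < (h:Int) from Int.ofNat_lt.mpr hk1)]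
      rw [hk1cast, ih (k + 1)]
      rw [show h - k = (h - (k + 1)) + 1 from by omega, List.take_succ_cons]
      rw [show m - k = (m - (k + 1)) + 1 from by omega, List.drop_succ_cons]
      by_cases hB : x = 'B' <;> simp [hB] <;> ring
    · rw [if_neg (show ¬ (((k:Int),x)).1 < (h:Int) from fun hc => hk1 (Int.ofNat_lt.mp hc))]
      by_cases hk2 : m ≤ k
      · rw [if_pos (show (m:Int) ≤ (((k:Int),x)).1 from Int.ofNat_le.mpr hk2)]
        rw [hk1cast, ih (k + 1)]
        rw [show h - k = 0 from by omega, show h - (k + 1) = 0 from by omega]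
        rw [show m - k = 0 from by omega, show m - (k + 1) = 0 from by omega]
        simp only [List.take_zero, List.drop_zero, List.count_nil, List.count_cons]
        by_cases hA : x = 'A' <;> simp [hA] <;> ring
      · rw [if_neg (show ¬ (m:Int) ≤ (((k:Int),x)).1 from fun hc => hk2 (Int.ofNat_le.mp hc))]
        rw [hk1cast, ih (k + 1)]
        rw [show h - k = 0 from by omega, show h - (k + 1) = 0 from by omega]
        rw [show m - k = (m - (k + 1)) + 1 from by omega, List.drop_succ_cons]
        simp

theorem alt_eq (s : String) :
    solve_alt s = (((s.toList.take (s.toList.length / 2)).count 'B' : Int)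
      + ((s.toList.drop (s.toList.length - s.toList.length / 2)).count 'A' : Int)) := by
  have hlen : PySem.Str.len s = (s.toList.length : Int) := by
    simp [PySem.Str.len_eq]
  have hfd : PySem.Int.floordiv ((s.toList.length : Nat) : Int) 2 = ((s.toList.length / 2 : Nat) : Int) := by
    unfold PySem.Int.floordiv
    rw [Int.fdiv_eq_ediv]
    rw [if_pos (Or.inl (by norm_num))]
    omega
  have hsub : ((s.toList.length : Int) - ((s.toList.length / 2 : Nat) : Int))
      = ((s.toList.length - s.toList.length / 2 : Nat) : Int) := by
    push_cast [Nat.div_le_self]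
    ring
  simp only [solve_alt, hlen, hfd, hsub]
  have h := enumFold (s.toList.length / 2) (s.toList.length - s.toList.length / 2)
    (by omega) s.toList 0 0
  simp only [Nat.cast_zero, Nat.sub_zero] at h
  rw [h]
  ring

-- invariant of A's loop, over Nat indices: counts 'B' on the next t front positions and
-- 'A' on the last t back positions, t = (j - i + 1) / 2 = number of iterations left
theorem solveLoop_eq (s : String) :
    ∀ (m i j : Nat) (c : Int), j - i = m → j < s.toList.length →
      solveLoop s (i : Int) (j : Int) c =
        c + (((s.toList.drop i).take ((j - i + 1) / 2)).count 'B' : Int)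
          + (((s.toList.drop (j + 1 - (j - i + 1) / 2)).take ((j - i + 1) / 2)).count 'A' : Int) := by
  intro m
  induction m using Nat.strong_induction_on with
  | _ m ih =>
    intro i j c hm hj
    by_cases hij : i < j
    · -- one loop step
      have hilen : i < s.toList.length := lt_trans hij hj
      rw [solveLoop]
      have hlt : (i : Int) < (j : Int) := by exact_mod_cast hij
      rw [if_pos hlt]
      have hgi : PySem.Str.pyGet? s (i : Int) = some s.toList[i] := by
        simp [List.getElem?_eq_getElem hilen]
      have hgj : PySem.Str.pyGet? s (j : Int) = some s.toList[j] := by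
        simp [List.getElem?_eq_getElem hj]
      have hcast : ((i : Int) + 1) = ((i + 1 : Nat) : Int) := by push_cast; ring
      have hcast' : ((j : Int) - 1) = ((j - 1 : Nat) : Int) := by
        have : 1 ≤ j := by omega
        push_cast [this]; ring
      rw [hgi, hgj, hcast, hcast']
      rw [ih ((j - 1) - (i + 1)) (by omega) (i + 1) (j - 1) _ rfl (by omega)]
      obtain ⟨t', ht⟩ : ∃ t', (j - i + 1) / 2 = t' + 1 := ⟨(j - i + 1) / 2 - 1, by omega⟩
      have ht' : ((j - 1) - (i + 1) + 1) / 2 = t' := by omega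
      rw [ht, ht']
      have htj : t' + 1 ≤ j := by omega
      -- front: take (t'+1) from drop i splits off s.toList[i]
      have hfront : (s.toList.drop i).take (t' + 1)
          = s.toList[i] :: (s.toList.drop (i + 1)).take t' := by
        rw [List.drop_eq_getElem_cons hilen, List.take_succ_cons]
      -- back: take (t'+1) from drop (j - t') splits off s.toList[j] at the end
      have hstart : (j - 1) + 1 - t' = j - t' := by omega
      have hstart' : j + 1 - (t' + 1) = j - t' := by omega
      have hback : (s.toList.drop (j - t')).take (t' + 1)
          = (s.toList.drop (j - t')).take t' ++ [s.toList[j]] := by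
        have hidx : (s.toList.drop (j - t'))[t']? = some s.toList[j] := by
          rw [List.getElem?_drop]
          have : j - t' + t' = j := by omega
          rw [this, List.getElem?_eq_getElem hj]
        rw [List.take_add_one, hidx]
        simp
      rw [hstart, hstart', hfront, hback]
      simp only [List.count_cons, List.count_append]
      by_cases hB : s.toList[i] = 'B' <;> by_cases hA : s.toList[j] = 'A' <;>
        simp [hB, hA] <;> ring
    · -- loop exits
      rw [solveLoop]
      have hlt : ¬ ((i : Int) < (j : Int)) := by exact_mod_cast hij
      rw [if_neg hlt]
      have ht0 : (j - i + 1) / 2 = 0 := by omega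
      simp [ht0]

theorem solve_eq_alt (s : String) : solve s = solve_alt s := by
  have hlen : PySem.Str.len s = (s.toList.length : Int) := by
    simp [PySem.Str.len_eq]
  rw [alt_eq]
  simp only [solve, hlen]
  cases hn : s.toList.length with
  | zero =>
    have h0 : s.toList = [] := List.length_eq_zero_iff.mp hn
    rw [solveLoop]
    norm_num [h0]
  | succ k =>
    have hcast : ((k + 1 : Nat) : Int) - 1 = ((k : Nat) : Int) := by push_cast; ring
    rw [hcast]
    have h := solveLoop_eq s k 0 k 0 (by omega) (by omega)
    simp only [Nat.cast_zero] at h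
    rw [h]
    have ht : (k - 0 + 1) / 2 = (k + 1) / 2 := by omega
    have htake : (s.toList.drop (k + 1 - (k + 1) / 2)).take ((k + 1) / 2)
        = s.toList.drop (k + 1 - (k + 1) / 2) := by
      apply List.take_of_length_le
      rw [List.length_drop, hn]
      omega
    rw [ht, htake]
    simp

-- ===== VERDICT =====
theorem solve_spec : Claim_equal_solve := by
  intro s _
  unfold Spec_solve
  exact solve_eq_alt s
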